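-- pv_equiv track=rewrite | github.com/minghaoguo81/Data-Structure-and-Algorithm-Class-Solutions | Algorithms on Strings/Week 4/Suffix_array_matching.py | Sorted_double
-- ===== SOURCE A (Python) =====
-- def Sorted_double(s, L, order, class_):
--     n = len(s)
--     count = [0] * n
--     new_order = [None] * n
--     for i in range(n):
--         count[class_[i]] += 1
--     for j in range(1, n):
--         count[j] += count[j - 1]
--     for i in range(n - 1, -1, -1):
--         start = (order[i] - L + n) % n
--         cl = class_[start]
--         count[cl] -= 1
--         new_order[count[cl]] = start
--     return new_order
-- ===== SOURCE B (Python) =====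
-- def Sorted_double(s, L, order, class_):
--     n = len(s)
--     starts = [(order[i] - L + n) % n for i in range(n)]
--     return sorted(starts, key=lambda st: class_[st])
-- ===== Notes on version B (the rewrite author's own statement) =====
-- stated objective: idiomatic
-- what changed: Replaces the hand-rolled stable counting sort (count array, prefix sums, reverse fill) by computing the shifted start positions and handing them to Python's stable sorted() with the class as key, which reproduces the same stable order.
-- outside the precondition, e.g. on Sorted_double('aaa', 1, [0, 3, 1], [-1, -3, 1]): A returns [2, 2, 0], B returns [0, 2, 2]; on Sorted_double('aaa', -1, [-3, 3, 1], [2, 1, 1]): A returns [1, 2, 1], B returns [1, 1, 2]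
import Mathlib
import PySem

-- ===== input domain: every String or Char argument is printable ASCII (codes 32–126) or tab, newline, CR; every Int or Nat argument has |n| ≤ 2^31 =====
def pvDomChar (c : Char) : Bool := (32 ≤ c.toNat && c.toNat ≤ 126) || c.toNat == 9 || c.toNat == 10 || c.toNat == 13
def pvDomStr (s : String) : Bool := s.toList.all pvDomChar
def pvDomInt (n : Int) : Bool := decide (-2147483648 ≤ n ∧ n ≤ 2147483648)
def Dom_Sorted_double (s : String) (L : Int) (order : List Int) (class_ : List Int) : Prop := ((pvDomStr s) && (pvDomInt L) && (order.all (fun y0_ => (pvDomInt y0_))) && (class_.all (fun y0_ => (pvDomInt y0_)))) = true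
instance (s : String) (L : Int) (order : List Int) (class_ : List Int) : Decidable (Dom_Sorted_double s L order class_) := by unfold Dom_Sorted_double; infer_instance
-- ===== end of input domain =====

-- B replaces A's hand-rolled stable counting sort (count array, prefix sums, reverse fill)
-- by computing the shifted start positions and stably sorting them by their class key.


-- ===== PORT A =====
-- Literal port of A's counting sort.  new_order's [None]*n initialiser is represented by
-- 0-placeholders: under Pre_ every slot is written exactly once, so no placeholder survives.
def Sorted_double (s : String) (L : Int) (order : List Int) (class_ : List Int) : List Int :=
  let n : Nat := s.toList.length           -- n = len(s)
  let count0 : List Int := List.replicate n 0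
  let count1 := (PySem.List.pyRange 0 (n : Int) 1).foldl (fun cnt i =>
      PySem.List.pySetD cnt (PySem.List.pyGetD class_ i 0)
        (PySem.List.pyGetD cnt (PySem.List.pyGetD class_ i 0) 0 + 1)) count0
  let count2 := (PySem.List.pyRange 1 (n : Int) 1).foldl (fun cnt j =>
      PySem.List.pySetD cnt j
        (PySem.List.pyGetD cnt j 0 + PySem.List.pyGetD cnt (j - 1) 0)) count1
  let res := (PySem.List.pyRange ((n : Int) - 1) (-1) (-1)).foldl
      (fun (st : List Int × List Int) i =>
        let start := PySem.Int.mod (PySem.List.pyGetD order i 0 - L + (n : Int)) (n : Int)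
        let cl := PySem.List.pyGetD class_ start 0
        let cnt' := PySem.List.pySetD st.1 cl (PySem.List.pyGetD st.1 cl 0 - 1)
        (cnt', PySem.List.pySetD st.2 (PySem.List.pyGetD cnt' cl 0) start))
      (count2, List.replicate n (0 : Int))
  res.2

-- ===== PORT B =====
def Sorted_double_alt (s : String) (L : Int) (order : List Int) (class_ : List Int) : List Int :=
  let n : Nat := s.toList.length
  let starts := (PySem.List.pyRange 0 (n : Int) 1).map
      (fun i => PySem.Int.mod (PySem.List.pyGetD order i 0 - L + (n : Int)) (n : Int))
  PySem.List.sorted starts (fun st => PySem.List.pyGetD class_ st 0) false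

-- ===== PRECONDITION & SPEC =====
-- Pre_ excludes inputs where A raises IndexError (class values or lengths out of range) and
-- inputs where A still returns but only by accident of its implementation: a class value in
-- [-n,0) makes count[cl]/new_order[...] wrap around via Python's negative indexing, and when
-- the histogram of the classes of the shifted starts differs from the histogram of class_
-- (order is then not a shifted permutation, the suffix-array invariant) the counting slots
-- collide or wrap, leaving None placeholders or an accidental arrangement.
def Pre_Sorted_double (s : String) (L : Int) (order : List Int) (class_ : List Int) : Prop :=
  s.toList.length ≤ order.length ∧ s.toList.length ≤ class_.length ∧
  (∀ j < s.toList.length, 0 ≤ class_.getD j 0 ∧ class_.getD j 0 < (s.toList.length : Int)) ∧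
  (∀ c < s.toList.length,
    (List.range s.toList.length).countP (fun i =>
        class_.getD (PySem.Int.mod (order.getD i 0 - L + (s.toList.length : Int)) (s.toList.length : Int)).toNat 0 = (c : Int))
      = (List.range s.toList.length).countP (fun i => class_.getD i 0 = (c : Int)))
instance (s : String) (L : Int) (order : List Int) (class_ : List Int) : Decidable (Pre_Sorted_double s L order class_) := by unfold Pre_Sorted_double; infer_instance

def pvWitness_Sorted_double : String × Int × List Int × List Int := ("ab", 0, [1, 0], [0, 1])

def Spec_Sorted_double (s : String) (L : Int) (order : List Int) (class_ : List Int) (out : List Int) : Prop := out = Sorted_double_alt s L order class_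
instance (s : String) (L : Int) (order : List Int) (class_ : List Int) (out : List Int) : Decidable (Spec_Sorted_double s L order class_ out) := by unfold Spec_Sorted_double; infer_instance

-- ===== CLAIM (what is proved, stated in full; the proofs are below) =====
def Claim_equal_Sorted_double : Prop := ∀ (s : String) (L : Int) (order : List Int) (class_ : List Int), Dom_Sorted_double s L order class_ → Pre_Sorted_double s L order class_ → Spec_Sorted_double s L order class_ (Sorted_double s L order class_)

-- ===== LEMMAS AND PROOFS =====

def pvVal (order : List Int) (L : Int) (n : Nat) (i : Nat) : Int :=
  PySem.Int.mod (order.getD i 0 - L + (n : Int)) (n : Int)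
def pvKey (class_ order : List Int) (L : Int) (n : Nat) (i : Nat) : Int :=
  class_.getD (pvVal order L n i).toNat 0
def pvCntP (key : Nat → Int) (l : List Nat) (c : Nat) : Nat :=
  l.countP (fun i => decide (key i = (c : Int)))
def pvHist (key : Nat → Int) (n c : Nat) : Nat := pvCntP key (List.range n) c
def pvPreB (key : Nat → Int) (n c : Nat) : Nat := ((List.range c).map (pvHist key n)).sum
def pvSuf (key : Nat → Int) (n t c : Nat) : Nat := pvCntP key (List.range' (n - t) t) c
def pvCnt (key : Nat → Int) (n t : Nat) : List Int :=
  (List.range n).map (fun c => (pvPreB key n (c + 1) : Int) - pvSuf key n t c)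
def pvArr (key val : Nat → Int) (n t : Nat) : List Int :=
  (List.range n).flatMap (fun c =>
    List.replicate (pvHist key n c - pvSuf key n t c) 0 ++
    ((List.range' (n - t) t).filter (fun i => decide (key i = (c : Int)))).map val)

theorem pvGetMap (g : Nat → Int) (n : Nat) (c d : Int) (h0 : 0 ≤ c) (h1 : c.toNat < n) :
    PySem.List.pyGetD ((List.range n).map g) c d = g c.toNat := by
  rw [PySem.List.pyGetD_eq_getElem _ _ h0 (by simpa using (by omega : c < (n:Int)))]
  simp
theorem pvSetMap (g : Nat → Int) (n : Nat) (c : Int) (v : Int) (h0 : 0 ≤ c) (h1 : c.toNat < n) :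
    PySem.List.pySetD ((List.range n).map g) c v
      = (List.range n).map (fun k => if k = c.toNat then v else g k) := by
  rw [PySem.List.pySetD_of_nonneg _ _ h0]
  apply List.ext_getElem (by simp)
  intro i hi hi2
  simp only [List.getElem_set, List.getElem_map, List.getElem_range]
  by_cases hic : i = c.toNat <;> simp [hic, Ne.symm]
theorem pvSetAppend (C B : List Int) (x v : Int) :
    PySem.List.pySetD (C ++ x :: B) ((C.length : Nat) : Int) v = C ++ v :: B := by
  rw [PySem.List.pySetD_natCast]
  induction C with
  | nil => simp
  | cons a t ih => simp [List.set_cons_succ, ih]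
theorem pvRangeDecomp (n t : Nat) (ht : t ≤ n) :
    List.range n = List.range (n - t) ++ List.range' (n - t) t := by
  rw [List.range_eq_range', List.range_eq_range']
  have h2 : n = (n - t) + t := by omega
  conv_lhs => rw [h2]
  rw [← List.range'_append_1, Nat.zero_add]
theorem pvRangeSplit (f : Nat → List Int) (n c0 : Nat) (h : c0 < n) :
    (List.range n).flatMap f
      = (List.range c0).flatMap f ++ (f c0 ++ (List.range' (c0 + 1) (n - c0 - 1)).flatMap f) := by
  rw [pvRangeDecomp n (n - c0) (by omega)]
  have h2 : n - (n - c0) = c0 := by omega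
  have h3 : n - c0 = 1 + (n - c0 - 1) := by omega
  rw [h2, h3, ← List.range'_append_1]
  simp [List.flatMap_append]

-- ---- new ----
theorem pvLoop1 (class_ : List Int) (n : Nat) (l : List Nat) (g : Nat → Int)
    (h : ∀ j ∈ l, 0 ≤ class_.getD j 0 ∧ (class_.getD j 0).toNat < n) :
    (l.map (Nat.cast : Nat → Int)).foldl
      (fun cnt i => PySem.List.pySetD cnt (PySem.List.pyGetD class_ i 0)
          (PySem.List.pyGetD cnt (PySem.List.pyGetD class_ i 0) 0 + 1))
      ((List.range n).map g)
    = (List.range n).map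
        (fun c => g c + (l.countP (fun j => decide (class_.getD j 0 = (c : Int))) : Nat)) := by
  induction l generalizing g with
  | nil => simp
  | cons j l ih =>
      obtain ⟨hj0, hjn⟩ := h j (by simp)
      simp only [List.map_cons, List.foldl_cons]
      rw [PySem.List.pyGetD_natCast]
      rw [pvGetMap g n _ 0 hj0 hjn, pvSetMap g n _ _ hj0 hjn]
      rw [ih _ (fun j hj => h j (by simp [hj]))]
      apply List.map_congr_left
      intro c hc
      simp only [List.countP_cons]
      by_cases hcc : c = (class_.getD j 0).toNat
      · subst hcc
        rw [if_pos rfl]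
        have hkey : class_.getD j 0 = (((class_.getD j 0).toNat : Nat) : Int) := by omega
        rw [← hkey]
        simp
        push_cast
        ring
      · rw [if_neg hcc]
        have hkey : ¬ (class_.getD j 0 = (c : Int)) := by omega
        simp only [List.getD] at hkey
        simp [hkey]

theorem pvLoop2 (n : Nat) (hist : Nat → Int) (m : Nat) :
    ∀ t : Nat, t = n - m → 1 ≤ t →
    (PySem.List.pyRange (t : Int) (n : Int) 1).foldl
      (fun cnt j => PySem.List.pySetD cnt j
          (PySem.List.pyGetD cnt j 0 + PySem.List.pyGetD cnt (j - 1) 0))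
      ((List.range n).map (fun c => if c < t then ((List.range (c + 1)).map hist).sum else hist c))
    = (List.range n).map (fun c => ((List.range (c + 1)).map hist).sum) := by
  induction m with
  | zero =>
      intro t ht h1
      rw [PySem.List.pyRange_one_eq_nil (by omega)]
      simp only [List.foldl_nil]
      apply List.map_congr_left
      intro c hc
      simp only [List.mem_range] at hc
      simp [show c < t by omega]
  | succ m ih =>
      intro t ht h1
      by_cases htn : n ≤ t
      · rw [PySem.List.pyRange_one_eq_nil (by exact_mod_cast Int.ofNat_le.mpr htn)]
        simp only [List.foldl_nil]
        apply List.map_congr_left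
        intro c hc
        simp only [List.mem_range] at hc
        simp [show c < t by omega]
      · push_neg at htn
        rw [PySem.List.pyRange_one_cons (by exact_mod_cast htn)]
        simp only [List.foldl_cons]
        rw [pvGetMap _ n _ 0 (by positivity) (by simpa using htn)]
        have ht1 : ((t : Int) - 1) = ((t - 1 : Nat) : Int) := by omega
        rw [ht1, pvGetMap _ n _ 0 (by positivity) (by simpa using (by omega : t - 1 < n))]
        rw [pvSetMap _ n _ _ (by positivity) (by simpa using htn)]
        have hcast : ((t : Int) + 1) = (((t + 1 : Nat)) : Int) := by push_cast; ring
        rw [hcast]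
        trans ((PySem.List.pyRange ((t + 1 : Nat) : Int) (n : Int) 1).foldl
          (fun cnt j => PySem.List.pySetD cnt j
              (PySem.List.pyGetD cnt j 0 + PySem.List.pyGetD cnt (j - 1) 0))
          ((List.range n).map (fun c => if c < t + 1 then ((List.range (c + 1)).map hist).sum else hist c)))
        · congr 1
          apply List.map_congr_left
          intro c hc
          simp only [List.mem_range] at hc
          simp only [Int.toNat_natCast]
          by_cases hct : c = t
          · subst hct
            rw [if_pos rfl]
            rw [if_neg (lt_irrefl c)]
            rw [if_pos (show c - 1 < c by omega)]
            rw [if_pos (show c < c + 1 by omega)]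
            have e1 : c - 1 + 1 = c := by omega
            rw [e1, List.range_succ]
            simp
            ring
          · rw [if_neg hct]
            by_cases hclt : c < t
            · rw [if_pos hclt, if_pos (by omega)]
            · rw [if_neg hclt, if_neg (by omega)]
        · exact ih (t + 1) (by omega) (by omega)

theorem pvRangeSuffix (n t : Nat) (ht : t < n) :
    List.range' (n - (t + 1)) (t + 1) = (n - t - 1) :: List.range' (n - t) t := by
  rw [show n - (t + 1) = n - t - 1 by omega, List.range'_succ,
    show n - t - 1 + 1 = n - t by omega]

theorem pvSufSucc (key : Nat → Int) (n t : Nat) (ht : t < n) (c : Nat) :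
    pvSuf key n (t + 1) c
      = (if key (n - t - 1) = (c : Int) then 1 else 0) + pvSuf key n t c := by
  unfold pvSuf pvCntP
  rw [pvRangeSuffix n t ht, List.countP_cons]
  by_cases hp : key (n - t - 1) = (c : Int) <;> simp [hp] <;> omega

theorem pvSufLe (key : Nat → Int) (n t c : Nat) (ht : t ≤ n) :
    pvSuf key n t c ≤ pvHist key n c := by
  unfold pvSuf pvHist pvCntP
  rw [pvRangeDecomp n t ht, List.countP_append]
  omega

theorem pvPreBSucc (key : Nat → Int) (n c : Nat) :
    pvPreB key n (c + 1) = pvPreB key n c + pvHist key n c := by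
  unfold pvPreB
  rw [List.range_succ]
  simp

theorem pvArrLen (key val : Nat → Int) (n t c0 : Nat) (ht : t ≤ n) :
    (((List.range c0).flatMap (fun c =>
        List.replicate (pvHist key n c - pvSuf key n t c) 0 ++
        ((List.range' (n - t) t).filter (fun i => decide (key i = (c : Int)))).map val)).length)
      = pvPreB key n c0 := by
  rw [List.length_flatMap]
  unfold pvPreB
  congr 1
  apply List.map_congr_left
  intro c hc
  have h1 := pvSufLe key n t c ht
  simp only [List.length_append, List.length_replicate, List.length_map,
    ← List.countP_eq_length_filter]
  have h2 : (List.range' (n - t) t).countP (fun i => decide (key i = (c : Int))) = pvSuf key n t c := rfl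
  omega


theorem pvFilterCons (key : Nat → Int) (n t : Nat) (ht : t < n) (c : Nat) :
    (List.range' (n - (t + 1)) (t + 1)).filter (fun i => decide (key i = (c : Int)))
      = if key (n - t - 1) = (c : Int)
        then (n - t - 1) :: (List.range' (n - t) t).filter (fun i => decide (key i = (c : Int)))
        else (List.range' (n - t) t).filter (fun i => decide (key i = (c : Int))) := by
  rw [pvRangeSuffix n t ht, List.filter_cons]
  by_cases hp : key (n - t - 1) = (c : Int) <;> simp [hp]

theorem pvSegCongr (key val : Nat → Int) (n t c0 : Nat) (ht : t < n)
    (hkey : key (n - t - 1) = (c0 : Int)) (l : List Nat) (hl : ∀ c ∈ l, c ≠ c0) :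
    l.flatMap (fun c => List.replicate (pvHist key n c - pvSuf key n (t + 1) c) 0 ++
        ((List.range' (n - (t + 1)) (t + 1)).filter (fun i => decide (key i = (c : Int)))).map val)
      = l.flatMap (fun c => List.replicate (pvHist key n c - pvSuf key n t c) 0 ++
        ((List.range' (n - t) t).filter (fun i => decide (key i = (c : Int)))).map val) := by
  apply List.flatMap_congr
  intro c hc
  have hne : ¬ (key (n - t - 1) = (c : Int)) := by
    intro hh
    rw [hkey] at hh
    exact hl c hc (by exact_mod_cast hh.symm)
  rw [pvFilterCons key n t ht c, if_neg hne, pvSufSucc key n t ht c, if_neg hne, Nat.zero_add]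

theorem pvWriteAt (A bkt S : List Int) (k : Nat) (v idx : Int)
    (hidx : idx = ((A.length + k : Nat) : Int)) :
    PySem.List.pySetD (A ++ ((List.replicate (k + 1) 0 ++ bkt) ++ S)) idx v
      = A ++ ((List.replicate k 0 ++ v :: bkt) ++ S) := by
  subst hidx
  rw [List.replicate_succ']
  have hshuffle : A ++ ((List.replicate k (0 : Int) ++ [0] ++ bkt) ++ S)
      = (A ++ List.replicate k 0) ++ ((0 : Int) :: (bkt ++ S)) := by
    simp [List.append_assoc]
  rw [hshuffle]
  have hlen : ((A.length + k : Nat) : Int) = (((A ++ List.replicate k (0 : Int)).length : Nat) : Int) := by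
    simp
  rw [hlen, pvSetAppend]
  simp [List.append_assoc]

theorem pvCntRead (key : Nat → Int) (n t : Nat) (j : Nat)
    (hk0 : 0 ≤ key j) (hkn : (key j).toNat < n) :
    PySem.List.pyGetD (pvCnt key n t) (key j) 0
      = (pvPreB key n ((key j).toNat + 1) : Int) - (pvSuf key n t ((key j).toNat) : Int) := by
  unfold pvCnt
  rw [pvGetMap _ n _ 0 hk0 hkn]

theorem pvCntStep (key : Nat → Int) (n t c0 : Nat) (ht : t < n)
    (hkey : key (n - t - 1) = (c0 : Int)) (hkn : c0 < n) :
    PySem.List.pySetD (pvCnt key n t) (key (n - t - 1))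
        (PySem.List.pyGetD (pvCnt key n t) (key (n - t - 1)) 0 - 1)
      = pvCnt key n (t + 1) := by
  have hk0 : 0 ≤ key (n - t - 1) := by rw [hkey]; positivity
  have htn : (key (n - t - 1)).toNat = c0 := by omega
  rw [pvCntRead key n t _ hk0 (by omega), htn]
  unfold pvCnt
  rw [pvSetMap _ n _ _ hk0 (by omega)]
  apply List.map_congr_left
  intro c hc
  rw [htn]
  by_cases hcc : c = c0
  · subst hcc
    rw [if_pos rfl, pvSufSucc key n t ht c, if_pos hkey]
    push_cast
    ring
  · have hne : ¬ (key (n - t - 1) = (c : Int)) := by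
      intro hh; rw [hkey] at hh; exact hcc (by exact_mod_cast hh.symm)
    rw [if_neg hcc, pvSufSucc key n t ht c, if_neg hne, Nat.zero_add]

theorem pvArrStep (key val : Nat → Int) (n t c0 : Nat) (ht : t < n)
    (hkey : key (n - t - 1) = (c0 : Int)) (hkn : c0 < n) :
    PySem.List.pySetD (pvArr key val n t)
        ((pvPreB key n (c0 + 1) : Int) - (pvSuf key n (t + 1) c0 : Int))
        (val (n - t - 1))
      = pvArr key val n (t + 1) := by
  have hsufsucc : pvSuf key n (t + 1) c0 = 1 + pvSuf key n t c0 := by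
    rw [pvSufSucc key n t ht c0, if_pos hkey]
  have hsufle : pvSuf key n (t + 1) c0 ≤ pvHist key n c0 := pvSufLe key n (t + 1) c0 (by omega)
  unfold pvArr
  rw [pvRangeSplit _ n c0 hkn, pvRangeSplit _ n c0 hkn]
  rw [pvSegCongr key val n t c0 ht hkey (List.range c0)
    (by intro c hc; simp only [List.mem_range] at hc; omega)]
  rw [pvSegCongr key val n t c0 ht hkey (List.range' (c0 + 1) (n - c0 - 1))
    (by intro c hc; have := List.mem_range'.mp hc; omega)]
  rw [pvFilterCons key n t ht c0, if_pos hkey, List.map_cons]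
  rw [show pvHist key n c0 - pvSuf key n t c0 = (pvHist key n c0 - pvSuf key n (t + 1) c0) + 1 by omega]
  apply pvWriteAt
  rw [pvArrLen key val n t c0 (by omega), pvPreBSucc key n c0]
  omega

theorem pvSumRange (n : Nat) (f : Nat → Nat) :
    ((List.range n).map f).sum = ∑ i ∈ Finset.range n, f i := Nat.add_zero _

theorem pvSumAux (key : Nat → Int) (n : Nat) (l : List Nat)
    (hl : ∀ i ∈ l, 0 ≤ key i ∧ (key i).toNat < n) :
    ((List.range n).map (fun c => pvCntP key l c)).sum = l.length := by
  induction l with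
  | nil => simp [pvCntP]
  | cons j l ih =>
      obtain ⟨hj0, hjn⟩ := hl j (by simp)
      have hstep : ∀ c : Nat, pvCntP key (j :: l) c
          = pvCntP key l c + (if (key j).toNat = c then 1 else 0) := by
        intro c
        unfold pvCntP
        rw [List.countP_cons]
        by_cases h : (key j).toNat = c
        · have hh : key j = (c : Int) := by omega
          simp [hh, h]
        · have hh : ¬ (key j = (c : Int)) := by omega
          simp [hh, h]
      have hmc : ((List.range n).map (fun c => pvCntP key (j :: l) c)).sum
          = ((List.range n).map (fun c => pvCntP key l c + (if (key j).toNat = c then 1 else 0))).sum := by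
        congr 1
        exact List.map_congr_left (fun c _ => hstep c)
      rw [hmc, pvSumRange, Finset.sum_add_distrib, ← pvSumRange]
      rw [ih (fun i hi => hl i (by simp [hi]))]
      have hone : ∑ c ∈ Finset.range n, (if (key j).toNat = c then 1 else 0) = 1 := by
        rw [Finset.sum_ite_eq]
        simp [Finset.mem_range, hjn]
      rw [hone]
      simp

theorem pvFlatRep (l : List Nat) (m : Nat → Nat) :
    l.flatMap (fun c => List.replicate (m c) (0 : Int)) = List.replicate ((l.map m).sum) 0 := by
  induction l with
  | nil => simp
  | cons a l ih => simp [ih, - List.replicate_add]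

theorem pvArrZero (key val : Nat → Int) (n : Nat)
    (hk : ∀ i, i < n → 0 ≤ key i ∧ (key i).toNat < n) :
    pvArr key val n 0 = List.replicate n 0 := by
  unfold pvArr
  have h0 : ∀ c : Nat, pvSuf key n 0 c = 0 := by
    intro c; unfold pvSuf pvCntP; simp
  have hbody : ∀ c ∈ List.range n,
      (List.replicate (pvHist key n c - pvSuf key n 0 c) 0 ++
        ((List.range' (n - 0) 0).filter (fun i => decide (key i = (c : Int)))).map val)
      = List.replicate (pvHist key n c) (0 : Int) := by
    intro c _
    rw [h0 c]
    simp
  rw [List.flatMap_congr hbody, pvFlatRep]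
  congr 1
  have := pvSumAux key n (List.range n) (by intro i hi; exact hk i (by simpa using hi))
  simpa [pvHist] using this

theorem pvArrFull (key val : Nat → Int) (n : Nat) :
    pvArr key val n n
      = (List.range n).flatMap (fun (c : Nat) =>
          ((List.range n).filter (fun i => decide (key i = (c : Int)))).map val) := by
  unfold pvArr
  apply List.flatMap_congr
  intro c _
  have hsuf : pvSuf key n n c = pvHist key n c := by
    unfold pvSuf pvHist pvCntP
    rw [Nat.sub_self, ← List.range_eq_range']
  rw [hsuf, Nat.sub_self]
  rw [Nat.sub_self, ← List.range_eq_range']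
  simp

theorem pvLoop3 (class_ order : List Int) (L : Int) (n : Nat)
    (hk : ∀ i, i < n → 0 ≤ pvKey class_ order L n i ∧ (pvKey class_ order L n i).toNat < n) :
    ∀ m : Nat, m ≤ n →
    (PySem.List.pyRange ((m : Int) - 1) (-1) (-1)).foldl
      (fun (st : List Int × List Int) i =>
        let start := PySem.Int.mod (PySem.List.pyGetD order i 0 - L + (n : Int)) (n : Int)
        let cl := PySem.List.pyGetD class_ start 0
        let cnt' := PySem.List.pySetD st.1 cl (PySem.List.pyGetD st.1 cl 0 - 1)
        (cnt', PySem.List.pySetD st.2 (PySem.List.pyGetD cnt' cl 0) start))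
      (pvCnt (pvKey class_ order L n) n (n - m), pvArr (pvKey class_ order L n) (pvVal order L n) n (n - m))
    = (pvCnt (pvKey class_ order L n) n n, pvArr (pvKey class_ order L n) (pvVal order L n) n n) := by
  intro m
  induction m with
  | zero =>
      intro _
      rw [show ((0 : Nat) : Int) - 1 = (-1 : Int) by norm_num]
      rw [PySem.List.pyRange_neg_one_eq_nil (by norm_num)]
      rw [Nat.sub_zero]
      simp
  | succ m ih =>
      intro hm
      have hmn : m < n := by omega
      have hT : n - (m + 1) < n := by omega
      have hj : n - (n - (m + 1)) - 1 = m := by omega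
      rw [show ((m + 1 : Nat) : Int) - 1 = ((m : Nat) : Int) by push_cast; ring]
      rw [PySem.List.pyRange_neg_one_cons (by omega)]
      simp only [List.foldl_cons]
      -- normalise start and cl
      rw [PySem.List.pyGetD_natCast order m 0]
      have hstart : PySem.Int.mod (order.getD m 0 - L + (n : Int)) (n : Int) = pvVal order L n m := rfl
      rw [hstart]
      have h0v : 0 ≤ pvVal order L n m := PySem.Int.mod_nonneg _ (by omega)
      have hcl : PySem.List.pyGetD class_ (pvVal order L n m) 0 = pvKey class_ order L n m := by
        rw [show pvVal order L n m = (((pvVal order L n m).toNat : Nat) : Int) by omega,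
          PySem.List.pyGetD_natCast]
        rfl
      rw [hcl]
      obtain ⟨hk0, hkn⟩ := hk m hmn
      have hkeym : pvKey class_ order L n m = (((pvKey class_ order L n m).toNat : Nat) : Int) := by omega
      -- count update
      have hcnt : PySem.List.pySetD (pvCnt (pvKey class_ order L n) n (n - (m + 1))) (pvKey class_ order L n m)
          (PySem.List.pyGetD (pvCnt (pvKey class_ order L n) n (n - (m + 1))) (pvKey class_ order L n m) 0 - 1)
          = pvCnt (pvKey class_ order L n) n (n - m) := by
        have := pvCntStep (pvKey class_ order L n) n (n - (m + 1)) ((pvKey class_ order L n m).toNat) hT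
          (by rw [hj]; exact hkeym.symm.symm) hkn
        rw [hj] at this
        rw [show n - (m + 1) + 1 = n - m by omega] at this
        exact this
      rw [hcnt]
      -- array update
      have hread : PySem.List.pyGetD (pvCnt (pvKey class_ order L n) n (n - m)) (pvKey class_ order L n m) 0
          = (pvPreB (pvKey class_ order L n) n ((pvKey class_ order L n m).toNat + 1) : Int)
            - (pvSuf (pvKey class_ order L n) n (n - m) ((pvKey class_ order L n m).toNat) : Int) :=
        pvCntRead (pvKey class_ order L n) n (n - m) m hk0 hkn
      rw [hread]
      have harr : PySem.List.pySetD (pvArr (pvKey class_ order L n) (pvVal order L n) n (n - (m + 1)))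
          ((pvPreB (pvKey class_ order L n) n ((pvKey class_ order L n m).toNat + 1) : Int)
            - (pvSuf (pvKey class_ order L n) n (n - m) ((pvKey class_ order L n m).toNat) : Int))
          (pvVal order L n m)
          = pvArr (pvKey class_ order L n) (pvVal order L n) n (n - m) := by
        have := pvArrStep (pvKey class_ order L n) (pvVal order L n) n (n - (m + 1))
          ((pvKey class_ order L n m).toNat) hT (by rw [hj]; exact hkeym.symm.symm) hkn
        rw [hj] at this
        rw [show n - (m + 1) + 1 = n - m by omega] at this
        exact this
      rw [harr]
      exact ih (by omega)

theorem pvInsertSkip {α : Type} (before : α → α → Bool) (x : α) (l r : List α)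
    (h : ∀ y ∈ l, before x y = false) :
    PySem.List.insertBy before x (l ++ r) = l ++ PySem.List.insertBy before x r := by
  induction l with
  | nil => simp
  | cons a t ih =>
      simp only [List.cons_append, PySem.List.insertBy, h a (by simp)]
      simp only [Bool.false_eq_true, if_false]
      rw [ih (fun y hy => h y (by simp [hy]))]

theorem pvInsertFront {α : Type} (before : α → α → Bool) (x : α) (r : List α)
    (h : ∀ y ∈ r, before x y = true) :
    PySem.List.insertBy before x r = x :: r := by
  cases r with
  | nil => simp [PySem.List.insertBy]
  | cons a t => simp [PySem.List.insertBy, h a (by simp)]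

theorem pvInsertBuckets {α : Type} (key : α → Int) (x : α) (ks : List Int) (xs : List α)
    (hp : ks.Pairwise (· < ·)) (hx : key x ∈ ks) :
    PySem.List.insertBy (fun a b => decide (key a < key b)) x
        (ks.flatMap (fun c => xs.filter (fun y => decide (key y = c))))
      = ks.flatMap (fun c => (xs ++ [x]).filter (fun y => decide (key y = c))) := by
  induction ks with
  | nil => simp at hx
  | cons c ks' ih =>
      rw [List.pairwise_cons] at hp
      obtain ⟨hc, hp'⟩ := hp
      simp only [List.flatMap_cons]
      have hkeyb : ∀ y ∈ xs.filter (fun y => decide (key y = c)), key y = c := by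
        intro y hy; simpa using (List.of_mem_filter hy)
      by_cases hxc : key x = c
      · rw [pvInsertSkip _ _ _ _ (by
          intro y hy; have := hkeyb y hy; simp [this, hxc])]
        rw [pvInsertFront _ _ _ (by
          intro y hy
          simp only [List.mem_flatMap] at hy
          obtain ⟨c', hc', hy'⟩ := hy
          have : key y = c' := by simpa using (List.of_mem_filter hy')
          simp [this, hxc]
          exact hc _ hc')]
        have h1 : (xs ++ [x]).filter (fun y => decide (key y = c)) =
            xs.filter (fun y => decide (key y = c)) ++ [x] := by
          simp [List.filter_append, hxc]
        have h2 : ks'.flatMap (fun c' => (xs ++ [x]).filter (fun y => decide (key y = c')))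
            = ks'.flatMap (fun c' => xs.filter (fun y => decide (key y = c'))) := by
          apply List.flatMap_congr
          intro c' hc'
          have : key x ≠ c' := by have := hc _ hc'; omega
          simp [List.filter_append, this]
        rw [h1, h2]
        simp
      · have hx' : key x ∈ ks' := by
          rcases List.mem_cons.mp hx with h | h
          · exact absurd h hxc
          · exact h
        rw [pvInsertSkip _ _ _ _ (by
          intro y hy; have := hkeyb y hy
          have := hc _ hx'
          simp only [decide_eq_false_iff_not]
          omega)]
        rw [ih hp' hx']
        have h1 : (xs ++ [x]).filter (fun y => decide (key y = c)) =
            xs.filter (fun y => decide (key y = c)) := by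
          simp [List.filter_append, hxc]
        rw [h1]

theorem pvSortedBuckets {α : Type} (key : α → Int) (xs : List α) (ks : List Int)
    (hp : ks.Pairwise (· < ·)) (hmem : ∀ x ∈ xs, key x ∈ ks) :
    PySem.List.sorted xs key false
      = ks.flatMap (fun c => xs.filter (fun y => decide (key y = c))) := by
  rw [PySem.List.sorted_eq_foldl_insertBy]
  induction xs using List.reverseRecOn with
  | nil => simp
  | append_singleton xs x ih =>
      rw [List.foldl_append]
      simp only [List.foldl_cons, List.foldl_nil]
      rw [ih (fun y hy => hmem y (by simp [hy]))]
      exact pvInsertBuckets key x ks xs hp (hmem x (by simp))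


theorem pvFlatMapMap {α β γ : Type} (l : List α) (f : α → β) (g : β → List γ) :
    (List.map f l).flatMap g = l.flatMap (fun a => g (f a)) := by
  induction l with
  | nil => rfl
  | cons a t ih => simp [ih]
theorem pvPairwiseCast (n : Nat) : (List.map (fun (c : Nat) => (c : Int)) (List.range n)).Pairwise (· < ·) := by
  refine List.Pairwise.map _ (fun a b h => ?_) (List.pairwise_lt_range)
  exact_mod_cast h

-- ===== VERDICT (by name: the statement is the Claim_ definition above) =====
theorem Sorted_double_spec : Claim_equal_Sorted_double := by
  unfold Claim_equal_Sorted_double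
  intro s L order class_ _ hpre
  unfold Spec_Sorted_double
  obtain ⟨hlo, hlc, hcls, hhist⟩ := hpre
  by_cases hn : s.toList.length = 0
  · -- empty string: both sides are []
    unfold Sorted_double Sorted_double_alt
    rw [hn]
    dsimp only
    rw [show ((0 : Nat) : Int) - 1 = (-1 : Int) by norm_num]
    rw [PySem.List.pyRange_neg_one_eq_nil (by norm_num)]
    rw [PySem.List.pyRange_zero_nat 0]
    simp [PySem.List.sorted]
  · have hN : 0 < s.toList.length := Nat.pos_of_ne_zero hn
    -- key bounds
    have hkb : ∀ i, i < s.toList.length →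
        0 ≤ pvKey class_ order L s.toList.length i ∧
        (pvKey class_ order L s.toList.length i).toNat < s.toList.length := by
      intro i _
      have hv0 : 0 ≤ pvVal order L s.toList.length i := PySem.Int.mod_nonneg _ (by omega)
      have hvlt : pvVal order L s.toList.length i < (s.toList.length : Int) :=
        PySem.Int.mod_lt _ (by omega)
      have := hcls (pvVal order L s.toList.length i).toNat (by omega)
      unfold pvKey
      omega
    -- ===== LHS : run the three loops =====
    unfold Sorted_double
    dsimp only
    rw [PySem.List.pyRange_zero_nat]
    rw [show List.replicate s.toList.length (0 : Int)
        = (List.range s.toList.length).map (fun _ => (0 : Int)) from by simp]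
    rw [pvLoop1 class_ s.toList.length (List.range s.toList.length) (fun _ => 0)
      (by intro j hj; have := hcls j (by simpa using hj); omega)]
    simp only [zero_add]
    have h12 : (List.range s.toList.length).map
        (fun (c : Nat) => ((List.range s.toList.length).countP
            (fun j => decide (class_.getD j 0 = (c : Int))) : Int))
      = (List.range s.toList.length).map
        (fun (c : Nat) => if c < 1
          then ((List.range (c + 1)).map
            (fun c' => (pvHist (pvKey class_ order L s.toList.length) s.toList.length c' : Int))).sum
          else (pvHist (pvKey class_ order L s.toList.length) s.toList.length c : Int)) := by
      apply List.map_congr_left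
      intro c hc
      simp only [List.mem_range] at hc
      have hcc : ((List.range s.toList.length).countP
            (fun j => decide (class_.getD j 0 = (c : Int))) : Nat)
          = pvHist (pvKey class_ order L s.toList.length) s.toList.length c :=
        (hhist c hc).symm
      by_cases hc1 : c < 1
      · rw [if_pos hc1]
        have hc0 : c = 0 := by omega
        subst hc0
        rw [show (0 + 1 : Nat) = 1 from rfl, List.range_one]
        simp only [List.map_cons, List.map_nil, List.sum_cons, List.sum_nil, add_zero]
        exact_mod_cast hcc
      · rw [if_neg hc1]
        exact_mod_cast hcc
    rw [h12]
    rw [show PySem.List.pyRange 1 (s.toList.length : Int) 1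
        = PySem.List.pyRange ((1 : Nat) : Int) (s.toList.length : Int) 1 from by norm_num]
    rw [pvLoop2 s.toList.length
      (fun c' => (pvHist (pvKey class_ order L s.toList.length) s.toList.length c' : Int))
      (s.toList.length - 1) 1 (by omega) (le_refl 1)]
    have hc2 : (List.range s.toList.length).map
        (fun (c : Nat) => ((List.range (c + 1)).map
          (fun c' => (pvHist (pvKey class_ order L s.toList.length) s.toList.length c' : Int))).sum)
      = pvCnt (pvKey class_ order L s.toList.length) s.toList.length 0 := by
      unfold pvCnt
      apply List.map_congr_left
      intro c hc
      have hs0 : pvSuf (pvKey class_ order L s.toList.length) s.toList.length 0 c = 0 := by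
        unfold pvSuf pvCntP
        simp
      rw [hs0]
      unfold pvPreB
      rw [Nat.cast_list_sum, List.map_map]
      simp [Function.comp_def]
    rw [hc2]
    have hArr0 : (List.range s.toList.length).map (fun _ => (0 : Int))
        = pvArr (pvKey class_ order L s.toList.length) (pvVal order L s.toList.length)
            s.toList.length 0 := by
      rw [pvArrZero _ _ _ hkb]
      simp
    rw [hArr0]
    have h3 := pvLoop3 class_ order L s.toList.length hkb s.toList.length (le_refl _)
    rw [Nat.sub_self] at h3
    rw [h3]
    rw [pvArrFull]
    -- ===== RHS : stable sort = buckets =====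
    unfold Sorted_double_alt
    dsimp only
    rw [PySem.List.pyRange_zero_nat, List.map_map]
    have hstarts : (List.range s.toList.length).map
        ((fun i => PySem.Int.mod (PySem.List.pyGetD order i 0 - L + (s.toList.length : Int))
            (s.toList.length : Int)) ∘ (fun (k : Nat) => (k : Int)))
        = (List.range s.toList.length).map (pvVal order L s.toList.length) := by
      apply List.map_congr_left
      intro j hj
      simp only [Function.comp]
      rw [PySem.List.pyGetD_natCast]
      rfl
    rw [hstarts]
    have hkeyB : ∀ j, j < s.toList.length →
        PySem.List.pyGetD class_ (pvVal order L s.toList.length j) 0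
          = pvKey class_ order L s.toList.length j := by
      intro j hj
      have hv0 : 0 ≤ pvVal order L s.toList.length j := PySem.Int.mod_nonneg _ (by omega)
      rw [show pvVal order L s.toList.length j
          = (((pvVal order L s.toList.length j).toNat : Nat) : Int) by omega]
      rw [PySem.List.pyGetD_natCast]
      rfl
    rw [pvSortedBuckets (fun st => PySem.List.pyGetD class_ st 0)
      ((List.range s.toList.length).map (pvVal order L s.toList.length))
      (List.map (fun (c : Nat) => (c : Int)) (List.range s.toList.length))
      (pvPairwiseCast s.toList.length)
      (by
        intro x hx
        obtain ⟨j, hj, rfl⟩ := List.mem_map.mp hx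
        simp only [List.mem_range] at hj
        dsimp only
        rw [hkeyB j hj]
        obtain ⟨hk0, hkn⟩ := hkb j hj
        refine List.mem_map.mpr ⟨(pvKey class_ order L s.toList.length j).toNat, ?_, by omega⟩
        simpa using hkn)]
    rw [pvFlatMapMap]
    apply List.flatMap_congr
    intro c hc
    simp only [List.mem_range] at hc
    rw [List.filter_map]
    congr 1
    apply List.filter_congr
    intro i hi
    simp only [List.mem_range] at hi
    simp only [Function.comp]
    rw [hkeyB i hi]
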